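-- pv_equiv track=rewrite | github.com/0xVector/set-packing-sat | src/set-packing.py | encode_disjoint
-- ===== SOURCE A (Python) =====
-- def encode_disjoint(subsets: list[set[int]]) -> frozenset[frozenset[int]]:
--     cnf = set()
--     for a_i, a in enumerate(subsets):
--         for b_i, b in enumerate(subsets[a_i + 1:], start=a_i + 1):  # skip self + duplicates
--             if a.isdisjoint(b):
--                 continue
--             clause = frozenset((-var(a_i), -var(b_i)))
--             cnf.add(clause)
--     return frozenset(cnf)
--
-- def var(subset_index: int) -> int:
--     return subset_index + 1
-- ===== SOURCE B (Python) =====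
-- def encode_disjoint(subsets: list[set[int]]) -> frozenset[frozenset[int]]:
--     # Inverted index: element -> indices of the subsets containing it (ascending).
--     index = {}
--     for i, s in enumerate(subsets):
--         for e in s:
--             index.setdefault(e, []).append(i)
--     cnf = []
--     for i, s in enumerate(subsets):
--         partners = {j for e in s for j in index[e] if j > i}
--         cnf.extend(frozenset((-i - 1, -j - 1)) for j in sorted(partners))
--     return frozenset(cnf)
-- ===== Notes on version B (the rewrite author's own statement) =====
-- stated objective: faster
-- what changed: Instead of testing every pair of subsets for disjointness, B builds an inverted element-to-subset-indices index in one pass and emits a clause only for pairs of subsets that actually co-occur on some element, deduplicated via a set.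
import Mathlib
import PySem

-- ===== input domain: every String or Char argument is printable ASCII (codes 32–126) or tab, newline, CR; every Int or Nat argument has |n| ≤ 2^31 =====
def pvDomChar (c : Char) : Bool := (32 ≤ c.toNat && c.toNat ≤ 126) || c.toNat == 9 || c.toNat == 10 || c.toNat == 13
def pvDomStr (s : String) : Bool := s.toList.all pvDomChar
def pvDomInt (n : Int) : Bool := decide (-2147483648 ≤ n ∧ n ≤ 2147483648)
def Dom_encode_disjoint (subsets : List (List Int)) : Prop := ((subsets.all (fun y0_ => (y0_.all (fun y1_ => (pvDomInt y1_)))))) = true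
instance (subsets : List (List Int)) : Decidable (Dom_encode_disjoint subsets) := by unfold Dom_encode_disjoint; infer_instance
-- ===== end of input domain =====

-- B replaces A's all-pairs disjointness scan by an inverted element→subset-indices
-- index, emitting a clause only for pairs of subsets that share an element (objective: faster).

-- ===== PORT A =====
def encode_disjoint (subsets : List (List Int)) : List (List Int) :=
  let cnf : PySem.Set (List Int) :=
    (PySem.List.enumerate subsets 0).foldl (fun cnf p =>
      (PySem.List.enumerate (PySem.List.slice subsets (some (p.1 + 1)) none) (p.1 + 1)).foldl
        (fun cnf q =>
          if PySem.Set.isdisjoint p.2 q.2 then cnf           -- continue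
          else PySem.Set.add cnf (PySem.Set.ofList [-(p.1 + 1), -(q.1 + 1)]))
        cnf)
      PySem.Set.empty
  PySem.Set.ofList cnf

-- ===== PORT B =====
def encode_disjoint_alt (subsets : List (List Int)) : List (List Int) :=
  let index : PySem.Dict Int (List Int) :=
    (PySem.List.enumerate subsets 0).foldl (fun d p =>
      p.2.foldl (fun d e => d.modify e [] (· ++ [p.1])) d)   -- index.setdefault(e, []).append(i)
      PySem.Dict.empty
  let cnf : List (List Int) :=
    (PySem.List.enumerate subsets 0).foldl (fun cnf p =>
      let partners : PySem.Set Int :=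
        PySem.Set.ofList (p.2.flatMap (fun e => (index.getD e []).filter (fun j => p.1 < j)))
      cnf ++ (PySem.List.sorted partners (fun x => x) false).map
        (fun j => PySem.Set.ofList [-(p.1 + 1), -(j + 1)]))
      []
  PySem.Set.ofList cnf

-- ===== PRECONDITION & SPEC =====
def Spec_encode_disjoint (subsets : List (List Int)) (out : List (List Int)) : Prop := out = encode_disjoint_alt subsets
instance (subsets : List (List Int)) (out : List (List Int)) : Decidable (Spec_encode_disjoint subsets out) := by unfold Spec_encode_disjoint; infer_instance

-- ===== CLAIM (what is proved, stated in full; the proofs are below) =====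
def Claim_equal_encode_disjoint : Prop := ∀ (subsets : List (List Int)), Dom_encode_disjoint subsets → Spec_encode_disjoint subsets (encode_disjoint subsets)

-- ===== LEMMAS AND PROOFS =====

def pvClause (i j : Int) : List Int := [-(i + 1), -(j + 1)]
def pvShares (s t : List Int) : Bool := !PySem.Set.isdisjoint s t
def pvGroup (E : List (Int × List Int)) (p : Int × List Int) : List (List Int) :=
  (E.filter (fun q => decide (p.1 < q.1) && pvShares p.2 q.2)).map (fun q => pvClause p.1 q.1)
def pvSpecOn (E l : List (Int × List Int)) : List (List Int) := l.flatMap (pvGroup E)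
def pvE (subsets : List (List Int)) : List (Int × List Int) := PySem.List.enumerate subsets 0

lemma pvAdd_of_not_mem {α : Type} [BEq α] [LawfulBEq α] (s : List α) (x : α) (h : x ∉ s) :
    PySem.Set.add s x = s ++ [x] := by
  simp [PySem.Set.add, PySem.Set.contains, h]

lemma pvClause_ofList {i j : Int} (h : i ≠ j) :
    PySem.Set.ofList [-(i + 1), -(j + 1)] = pvClause i j := by
  simp [PySem.Set.ofList, PySem.Set.add, PySem.Set.contains, pvClause]
  omega

lemma pvClause_inj {i j i' j' : Int} (h : pvClause i j = pvClause i' j') : i = i' ∧ j = j' := by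
  simp [pvClause] at h
  omega

lemma pvFoldl_add_fresh {α β : Type} [BEq β] [LawfulBEq β]
    (l : List α) (c : α → Bool) (f : α → β) :
    ∀ (acc : List β), (∀ x ∈ l, c x = false → f x ∉ acc) →
    ((l.filter (fun x => !c x)).map f).Nodup →
    l.foldl (fun s x => if c x then s else PySem.Set.add s (f x)) acc
      = acc ++ (l.filter (fun x => !c x)).map f := by
  induction l with
  | nil => intro acc _ _; simp
  | cons x t ih =>
    intro acc hfresh hnd
    by_cases hc : c x = true
    · simp only [List.foldl_cons]
      rw [show (if c x = true then acc else PySem.Set.add acc (f x)) = acc by simp [hc]]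
      rw [ih acc (fun y hy => hfresh y (by simp [hy])) (by simpa [List.filter_cons, hc] using hnd)]
      simp [List.filter_cons, hc]
    · replace hc : c x = false := by simpa using hc
      simp only [List.filter_cons, hc, Bool.not_false, if_true] at hnd ⊢
      simp only [List.foldl_cons]
      rw [show (if c x = true then acc else PySem.Set.add acc (f x)) = PySem.Set.add acc (f x) by simp [hc]]
      rw [pvAdd_of_not_mem acc (f x) (hfresh x (by simp) hc)]
      simp only [List.map_cons] at hnd
      rw [ih (acc ++ [f x]) ?_ (List.nodup_cons.mp hnd).2]
      · simp
      · intro y hy hcy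
        simp only [List.mem_append, List.mem_singleton]
        push_neg
        refine ⟨hfresh y (by simp [hy]) hcy, fun hxy => (List.nodup_cons.mp hnd).1 ?_⟩
        rw [← hxy]
        exact List.mem_map_of_mem (by simp [List.mem_filter, hy, hcy])

lemma pvEnumerate_drop {α : Type} (xs : List α) (k : Nat) (hk : k ≤ xs.length) :
    PySem.List.enumerate (xs.drop k) (k : Int) = (PySem.List.enumerate xs 0).drop k := by
  conv_rhs => rw [← List.take_append_drop k xs]
  rw [PySem.List.enumerate_append]
  have h2 : (PySem.List.enumerate (xs.take k) 0).length = k := by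
    simp [PySem.List.length_enumerate, hk]
  rw [List.drop_append_of_le_length (le_of_eq h2.symm)]
  rw [List.drop_of_length_le (le_of_eq h2)]
  simp [Nat.min_eq_left hk]

lemma pvMem_specOn {E l : List (Int × List Int)} {x : List Int} (h : x ∈ pvSpecOn E l) :
    ∃ r ∈ l, ∃ j : Int, x = pvClause r.1 j := by
  simp only [pvSpecOn, List.mem_flatMap, pvGroup, List.mem_map, List.mem_filter] at h
  obtain ⟨r, hr, q, hq, rfl⟩ := h
  exact ⟨r, hr, q.1, rfl⟩

lemma pvOfList_eq_self {α : Type} [BEq α] [LawfulBEq α] (xs : List α) (h : xs.Nodup) :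
    PySem.Set.ofList xs = xs := by
  rw [PySem.Set.ofList_eq_foldl]
  suffices H : ∀ (ys : List α), ys.Nodup → ∀ (acc : List α), (∀ x ∈ ys, x ∉ acc) → ys.foldl PySem.Set.add acc = acc ++ ys by
    simpa using H xs h [] (by simp)
  intro ys
  induction ys with
  | nil => intro _ acc _; simp
  | cons x t ih =>
    intro hnd acc hacc
    have hx : x ∉ acc := hacc x (by simp)
    simp only [List.foldl_cons, pvAdd_of_not_mem acc x hx]
    rw [ih (List.nodup_cons.mp hnd).2 (acc ++ [x]) ?_]
    · simp
    · intro y hy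
      simp only [List.mem_append, List.mem_singleton]
      push_neg
      exact ⟨hacc y (by simp [hy]), fun hxy => (List.nodup_cons.mp hnd).1 (hxy ▸ hy)⟩

lemma pvSpecOn_nodup (E : List (Int × List Int)) (hE : E.Pairwise (fun a b => a.1 < b.1)) :
    ∀ (l : List (Int × List Int)), l.Pairwise (fun a b => a.1 < b.1) → (pvSpecOn E l).Nodup := by
  intro l
  induction l with
  | nil => intro _; simp [pvSpecOn]
  | cons p t ih =>
    intro hl
    obtain ⟨hpt, hlt⟩ := List.pairwise_cons.mp hl
    have hgn : (pvGroup E p).Nodup := by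
      unfold pvGroup
      apply List.Pairwise.map (R := fun a b => a.1 < b.1)
      · intro a b hab heq
        have := (pvClause_inj heq).2
        omega
      · exact hE.filter _
    have hspec : pvSpecOn E (p :: t) = pvGroup E p ++ pvSpecOn E t := by
      simp [pvSpecOn]
    rw [hspec]
    refine (hgn.append (ih hlt)) ?_
    intro x hx hx'
    obtain ⟨r, hr, j, rfl⟩ := pvMem_specOn hx'
    simp only [pvGroup, List.mem_map, List.mem_filter] at hx
    obtain ⟨q, _, heq⟩ := hx
    have h1 := (pvClause_inj heq).1
    have h2 := hpt r hr
    omega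

lemma pvA_fold (subsets : List (List Int)) :
    ∀ (t u : List (Int × List Int)), pvE subsets = u ++ t →
    t.foldl (fun cnf p =>
      (PySem.List.enumerate (PySem.List.slice subsets (some (p.1 + 1)) none) (p.1 + 1)).foldl
        (fun cnf q => if PySem.Set.isdisjoint p.2 q.2 then cnf
          else PySem.Set.add cnf (PySem.Set.ofList [-(p.1 + 1), -(q.1 + 1)])) cnf)
      (pvSpecOn (pvE subsets) u)
    = pvSpecOn (pvE subsets) (u ++ t) := by
  intro t
  induction t with
  | nil => intro u h; simp
  | cons p t' ih =>
    intro u hE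
    have hpwE : (pvE subsets).Pairwise (fun a b => a.1 < b.1) := by
      unfold pvE; exact PySem.List.pairwise_lt_enumerate subsets 0
    have hpw' : (u ++ p :: t').Pairwise (fun a b => a.1 < b.1) := hE ▸ hpwE
    obtain ⟨hpu, hpc, hcross⟩ := List.pairwise_append.mp hpw'
    have hlt_u : ∀ r ∈ u, r.1 < p.1 := fun r hr => hcross r hr p (by simp)
    have hlt_t : ∀ q ∈ t', p.1 < q.1 := (List.pairwise_cons.mp hpc).1
    have hul : u.length + 1 ≤ subsets.length := by
      have := congrArg List.length hE
      simp [pvE, PySem.List.length_enumerate] at this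
      omega
    have hgp : (pvE subsets)[u.length]? = some p := by
      rw [hE, List.getElem?_append_right (le_refl _)]
      simp
    have hp1 : p.1 = (u.length : Int) := by
      rw [pvE, PySem.List.getElem?_enumerate] at hgp
      obtain ⟨x, hx1, hx2⟩ := Option.map_eq_some_iff.mp hgp
      rw [← hx2]
      simp
    have hslice : PySem.List.slice subsets (some (p.1 + 1)) none = subsets.drop (u.length + 1) := by
      rw [hp1, PySem.List.slice_from subsets (show (0:Int) ≤ (u.length : Int) + 1 by positivity)]
      congr 1
    have hdropE : (pvE subsets).drop (u.length + 1) = t' := by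
      rw [hE, List.append_cons, List.drop_left' (by simp)]
    have henum : PySem.List.enumerate (subsets.drop (u.length + 1)) (p.1 + 1) = t' := by
      rw [show p.1 + 1 = ((u.length + 1 : Nat) : Int) by rw [hp1]; push_cast; ring]
      rw [pvEnumerate_drop subsets (u.length + 1) hul]
      exact hdropE
    simp only [List.foldl_cons]
    rw [hslice, henum]
    have hcongr : ∀ (acc : List (List Int)) (q : Int × List Int), q ∈ t' →
        (if PySem.Set.isdisjoint p.2 q.2 then acc
          else PySem.Set.add acc (PySem.Set.ofList [-(p.1 + 1), -(q.1 + 1)]))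
        = (if PySem.Set.isdisjoint p.2 q.2 then acc
          else PySem.Set.add acc (pvClause p.1 q.1)) := by
      intro acc q hq
      rw [pvClause_ofList (ne_of_lt (hlt_t q hq))]
    rw [PySem.List.foldl_congr_mem _ _ _ _ hcongr]
    rw [pvFoldl_add_fresh t' (fun q => PySem.Set.isdisjoint p.2 q.2)
        (fun q => pvClause p.1 q.1) (pvSpecOn (pvE subsets) u) ?fresh ?nodup]
    case fresh =>
      intro q hq hcq hmem
      obtain ⟨r, hr, j, heq⟩ := pvMem_specOn hmem
      have h1 := (pvClause_inj heq).1
      have h2 := hlt_u r hr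
      omega
    case nodup =>
      apply List.Pairwise.map (R := fun a b => a.1 < b.1)
      · intro a b hab heq
        have := (pvClause_inj heq).2
        omega
      · exact ((List.pairwise_cons.mp hpc).2).filter _
    have hgroup : pvGroup (pvE subsets) p
        = (t'.filter (fun q => !PySem.Set.isdisjoint p.2 q.2)).map (fun q => pvClause p.1 q.1) := by
      unfold pvGroup
      congr 1
      rw [hE, List.filter_append, List.filter_cons]
      rw [List.filter_eq_nil_iff.mpr (fun r hr => by
        have := hlt_u r hr
        simp [show ¬ (p.1 < r.1) by omega])]
      rw [show (decide (p.1 < p.1) && pvShares p.2 p.2) = false by simp, List.nil_append]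
      simp only [Bool.false_eq_true, if_false]
      apply List.filter_congr
      intro q hq
      simp [pvShares, hlt_t q hq]
    rw [← hgroup]
    rw [show pvSpecOn (pvE subsets) u ++ pvGroup (pvE subsets) p
        = pvSpecOn (pvE subsets) (u ++ [p]) by simp [pvSpecOn]]
    rw [ih (u ++ [p]) (by rw [hE]; simp)]
    simp

theorem pvA_main (subsets : List (List Int)) :
    PySem.Set.ofList
      ((PySem.List.enumerate subsets 0).foldl (fun cnf p =>
        (PySem.List.enumerate (PySem.List.slice subsets (some (p.1 + 1)) none) (p.1 + 1)).foldl
          (fun cnf q =>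
            if PySem.Set.isdisjoint p.2 q.2 then cnf
            else PySem.Set.add cnf (PySem.Set.ofList [-(p.1 + 1), -(q.1 + 1)]))
          cnf)
        PySem.Set.empty)
      = pvSpecOn (pvE subsets) (pvE subsets) := by
  have h0 : (PySem.Set.empty : PySem.Set (List Int)) = pvSpecOn (pvE subsets) [] := by
    simp [pvSpecOn, PySem.Set.empty]
  rw [show PySem.List.enumerate subsets 0 = pvE subsets by rw [pvE]]
  rw [h0, pvA_fold subsets (pvE subsets) [] (by simp)]
  rw [List.nil_append]
  have hpwE : (pvE subsets).Pairwise (fun a b => a.1 < b.1) := by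
    unfold pvE; exact PySem.List.pairwise_lt_enumerate subsets 0
  exact pvOfList_eq_self _ (pvSpecOn_nodup _ hpwE _ hpwE)

def pvIndex (subsets : List (List Int)) : PySem.Dict Int (List Int) :=
  (pvE subsets).foldl (fun d p => p.2.foldl (fun d e => d.modify e [] (· ++ [p.1])) d)
    PySem.Dict.empty

def pvL (subsets : List (List Int)) : List (Int × Int) :=
  (pvE subsets).flatMap (fun p => p.2.map (fun e => (e, p.1)))

lemma pvShares_iff (s t : List Int) : pvShares s t = true ↔ ∃ e ∈ s, e ∈ t := by
  unfold pvShares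
  rw [Bool.not_eq_eq_eq_not, Bool.not_true, ← Bool.not_eq_true, PySem.Set.isdisjoint_iff]
  push_neg
  simp

lemma pvFoldl_flatMap {α β γ : Type} (l : List α) (g : α → List β) (f : γ → β → γ) :
    ∀ init, (l.flatMap g).foldl f init = l.foldl (fun a x => (g x).foldl f a) init := by
  induction l with
  | nil => intro init; simp
  | cons x t ih => intro init; simp [List.flatMap_cons, List.foldl_append, ih]

lemma pvIndex_eq (subsets : List (List Int)) :
    pvIndex subsets
      = (pvL subsets).foldl (fun d q => d.modify q.1 [] (· ++ [q.2])) PySem.Dict.empty := by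
  rw [pvL, pvFoldl_flatMap]
  apply PySem.List.foldl_congr_mem
  intro acc p _
  rw [List.foldl_map]

lemma pvIndex_getD (subsets : List (List Int)) (e : Int) :
    (pvIndex subsets).getD e [] = ((pvL subsets).filter (fun q => q.1 == e)).map (·.2) := by
  rw [pvIndex_eq, PySem.Dict.getD_foldl_modify_append]
  simp [PySem.Dict.empty, PySem.Dict.getD, PySem.Dict.get?]

lemma pvMem_getD (subsets : List (List Int)) (e j : Int) :
    j ∈ (pvIndex subsets).getD e [] ↔ ∃ p ∈ pvE subsets, j = p.1 ∧ e ∈ p.2 := by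
  rw [pvIndex_getD]
  simp only [List.mem_map, List.mem_filter, pvL, List.mem_flatMap]
  constructor
  · rintro ⟨q, ⟨⟨p, hp, hq⟩, hqe⟩, rfl⟩
    obtain ⟨e', he', heq⟩ := hq
    rw [← heq] at hqe ⊢
    simp only [beq_iff_eq] at hqe
    exact ⟨p, hp, rfl, hqe ▸ he'⟩
  · rintro ⟨p, hp, rfl, he⟩
    exact ⟨(e, p.1), ⟨⟨p, hp, ⟨e, he, rfl⟩⟩, by simp⟩, rfl⟩

lemma pvPartners (subsets : List (List Int)) (p : Int × List Int) :
    PySem.List.sorted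
      (PySem.Set.ofList (p.2.flatMap (fun e =>
        ((pvIndex subsets).getD e []).filter (fun j => p.1 < j))))
      (fun x => x) false
    = ((pvE subsets).filter (fun q => decide (p.1 < q.1) && pvShares p.2 q.2)).map (·.1) := by
  have hpwE : (pvE subsets).Pairwise (fun a b => a.1 < b.1) := by
    unfold pvE; exact PySem.List.pairwise_lt_enumerate subsets 0
  have hys : (((pvE subsets).filter (fun q => decide (p.1 < q.1) && pvShares p.2 q.2)).map (·.1)).Pairwise
      (fun a b => a < b) := by
    apply List.Pairwise.map (R := fun a b : Int × List Int => a.1 < b.1)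
    · exact fun a b h => h
    · exact hpwE.filter _
  apply PySem.List.sorted_eq_of_perm_of_pairwise_lt
  · rw [List.perm_ext_iff_of_nodup (hys.imp ne_of_lt) (PySem.Set.nodup_ofList _)]
    intro j
    rw [PySem.Set.mem_ofList]
    simp only [List.mem_map, List.mem_filter, List.mem_flatMap, pvMem_getD,
      Bool.and_eq_true, decide_eq_true_eq, pvShares_iff]
    constructor
    · rintro ⟨q, ⟨hq, hlt, e, he, heq⟩, rfl⟩
      exact ⟨e, he, ⟨q, hq, rfl, heq⟩, by simpa using hlt⟩
    · rintro ⟨e, he, ⟨q, hq, rfl, heq⟩, hlt⟩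
      exact ⟨q, ⟨hq, by simpa using hlt, e, he, heq⟩, rfl⟩
  · exact hys

theorem pvB_main (subsets : List (List Int)) :
    PySem.Set.ofList
      ((pvE subsets).foldl (fun cnf p =>
        cnf ++ (PySem.List.sorted
            (PySem.Set.ofList (p.2.flatMap (fun e =>
              ((pvIndex subsets).getD e []).filter (fun j => p.1 < j))))
            (fun x => x) false).map
          (fun j => PySem.Set.ofList [-(p.1 + 1), -(j + 1)]))
        [])
      = pvSpecOn (pvE subsets) (pvE subsets) := by
  have hbody : ∀ (acc : List (List Int)) (p : Int × List Int), p ∈ pvE subsets →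
      acc ++ (PySem.List.sorted
          (PySem.Set.ofList (p.2.flatMap (fun e =>
            ((pvIndex subsets).getD e []).filter (fun j => p.1 < j))))
          (fun x => x) false).map
        (fun j => PySem.Set.ofList [-(p.1 + 1), -(j + 1)])
      = acc ++ pvGroup (pvE subsets) p := by
    intro acc p _
    rw [pvPartners subsets p, List.map_map]
    congr 1
    apply List.map_congr_left
    intro q hq
    have hlt : p.1 < q.1 := by
      have := (List.mem_filter.mp hq).2
      simp only [Bool.and_eq_true, decide_eq_true_eq] at this
      exact this.1
    exact pvClause_ofList (ne_of_lt hlt)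
  rw [PySem.List.foldl_congr_mem _ _ _ _ hbody]
  rw [PySem.List.foldl_append_eq_flatMap]
  rw [List.nil_append]
  have hpwE' : (pvE subsets).Pairwise (fun a b => a.1 < b.1) := by
    unfold pvE; exact PySem.List.pairwise_lt_enumerate subsets 0
  exact pvOfList_eq_self _ (pvSpecOn_nodup _ hpwE' _ hpwE')

theorem pvA_port (subsets : List (List Int)) :
    encode_disjoint subsets = pvSpecOn (pvE subsets) (pvE subsets) := by
  show PySem.Set.ofList
      ((PySem.List.enumerate subsets 0).foldl (fun cnf p =>
        (PySem.List.enumerate (PySem.List.slice subsets (some (p.1 + 1)) none) (p.1 + 1)).foldl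
          (fun cnf q =>
            if PySem.Set.isdisjoint p.2 q.2 then cnf
            else PySem.Set.add cnf (PySem.Set.ofList [-(p.1 + 1), -(q.1 + 1)]))
          cnf)
        PySem.Set.empty)
      = pvSpecOn (pvE subsets) (pvE subsets)
  exact pvA_main subsets

theorem pvB_port (subsets : List (List Int)) :
    encode_disjoint_alt subsets = pvSpecOn (pvE subsets) (pvE subsets) := by
  show PySem.Set.ofList
      ((pvE subsets).foldl (fun cnf p =>
        cnf ++ (PySem.List.sorted
            (PySem.Set.ofList (p.2.flatMap (fun e =>
              ((pvIndex subsets).getD e []).filter (fun j => p.1 < j))))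
            (fun x => x) false).map
          (fun j => PySem.Set.ofList [-(p.1 + 1), -(j + 1)]))
        [])
      = pvSpecOn (pvE subsets) (pvE subsets)
  exact pvB_main subsets

-- ===== VERDICT (by name: the statement is the Claim_ definition above) =====
theorem encode_disjoint_spec : Claim_equal_encode_disjoint := by
  intro subsets _
  unfold Spec_encode_disjoint
  rw [pvA_port, pvB_port]
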